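-- pv_equiv track=rewrite | github.com/Jaypatil588/PulseFi | pipeline/sweep_presence_thresholds.py | _infer_label_from_markers
-- ===== SOURCE A (Python) =====
-- from typing import Dict, List, Optional, Tuple
--
-- def _infer_label_from_markers(markers: List[Dict[str, str]]) -> Optional[int]:
--     events = [str(m.get("event", "")).strip() for m in markers]
--     # Accept human_start-only sessions (capture may have been stopped early).
--     has_human_start = "human_start" in events
--     is_stable = len([e for e in events if e]) == 0
--     if has_human_start:
--         return 1
--     if is_stable:
--         return 0
--     return None
-- ===== SOURCE B (Python) =====
-- from typing import Dict, List, Optional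
--
-- def _infer_label_from_markers(markers: List[Dict[str, str]]) -> Optional[int]:
--     # Classify each marker by severity (2 = human_start, 1 = other non-empty
--     # event, 0 = empty), reduce with max, and map the extreme through a table.
--     def severity(m):
--         e = str(m.get("event", "")).strip()
--         return 2 if e == "human_start" else 1 if e else 0
--     score = max(map(severity, markers), default=0)
--     return {2: 1, 0: 0}.get(score)
-- ===== Notes on version B (the rewrite author's own statement) =====
-- stated objective: alternative
-- what changed: Replaces A's intermediate events list and its two separate post-scans (membership test and filter-count) with a per-marker severity code (2 for human_start, 1 for other non-empty, 0 for empty), a single max-reduction with default 0, and a table lookup mapping the extreme to the label.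
import Mathlib
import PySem

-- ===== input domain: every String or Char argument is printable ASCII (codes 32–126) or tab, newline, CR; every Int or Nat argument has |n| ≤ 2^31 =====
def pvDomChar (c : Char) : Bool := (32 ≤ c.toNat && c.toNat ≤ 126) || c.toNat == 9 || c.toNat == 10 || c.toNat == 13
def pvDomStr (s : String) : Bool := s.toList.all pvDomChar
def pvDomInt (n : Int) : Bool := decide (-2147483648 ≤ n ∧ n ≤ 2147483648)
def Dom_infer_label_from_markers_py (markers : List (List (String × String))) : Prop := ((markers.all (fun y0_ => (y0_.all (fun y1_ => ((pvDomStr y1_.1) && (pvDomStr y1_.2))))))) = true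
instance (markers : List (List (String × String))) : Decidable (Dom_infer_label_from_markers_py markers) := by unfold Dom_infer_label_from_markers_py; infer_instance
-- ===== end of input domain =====

-- B replaces A's events list plus two post-scans by a severity code per marker (2/1/0),
-- a single max-reduction, and a table lookup on the extreme (objective: alternative).

-- ===== PORT A =====
-- str(m.get("event", "")).strip()
def pvEvent (m : List (String × String)) : String :=
  PySem.Str.strip ((PySem.Dict.ofList m).getD "event" "")

def infer_label_from_markers_py (markers : List (List (String × String))) : Option Int :=
  let events := markers.map pvEvent
  let has_human_start := events.contains "human_start"
  let is_stable := (events.filter (fun e => !(e == ""))).length == 0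
  if has_human_start then some 1
  else if is_stable then some 0
  else none

-- ===== PORT B =====
-- 2 if e == "human_start" else 1 if e else 0
def pvSeverity (m : List (String × String)) : Int :=
  let e := pvEvent m
  if e == "human_start" then 2 else if !(e == "") then 1 else 0

def infer_label_from_markers_py_alt (markers : List (List (String × String))) : Option Int :=
  let score := PySem.List.maxD (markers.map pvSeverity) (fun x => x) 0
  (PySem.Dict.ofList [((2 : Int), (1 : Int)), ((0 : Int), (0 : Int))]).get? score

-- ===== PRECONDITION & SPEC =====
def Spec_infer_label_from_markers_py (markers : List (List (String × String))) (out : Option Int) : Prop := out = infer_label_from_markers_py_alt markers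
instance (markers : List (List (String × String))) (out : Option Int) : Decidable (Spec_infer_label_from_markers_py markers out) := by unfold Spec_infer_label_from_markers_py; infer_instance

-- ===== CLAIM (what is proved, stated in full; the proofs are below) =====
def Claim_equal_infer_label_from_markers_py : Prop := ∀ (markers : List (List (String × String))), Dom_infer_label_from_markers_py markers → Spec_infer_label_from_markers_py markers (infer_label_from_markers_py markers)

-- ===== LEMMAS AND PROOFS =====

-- severity as a function of the stripped event string
def pvSev (e : String) : Int := if e == "human_start" then 2 else if !(e == "") then 1 else 0

-- A's two scan results, combined into the "best severity" of the event list.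
def pvBest (l : List String) : Int :=
  if l.contains "human_start" then 2 else if l.any (fun e => !(e == "")) then 1 else 0

theorem pvSev_nonneg (e : String) : 0 ≤ pvSev e := by
  unfold pvSev; split_ifs <;> omega

theorem pvBest_cons (e : String) (l : List String) :
    max (pvSev e) (pvBest l) = pvBest (e :: l) := by
  unfold pvSev pvBest
  rw [List.contains_cons, List.any_cons,
    show (("human_start" == e) : Bool) = (e == "human_start") from BEq.comm]
  rcases he : (e == "human_start") with _ | _ <;>
    rcases hz : (e == "") with _ | _ <;>
    rcases hc : (l.contains "human_start") with _ | _ <;>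
    rcases ha : (l.any (fun x => !(x == ""))) with _ | _ <;>
    simp

-- the running-max fold over severities computes max of the start and pvBest
theorem pv_foldmax (l : List String) (m : Int) (hm : 0 ≤ m) :
    (l.map pvSev).foldl max m = max m (pvBest l) := by
  induction l generalizing m with
  | nil => simp [pvBest, max_eq_left hm]
  | cons e t ih =>
    simp only [List.map_cons, List.foldl_cons]
    rw [ih (max m (pvSev e)) (le_trans hm (le_max_left _ _)), max_assoc, pvBest_cons]

-- Python's max(..., default=0) over the severity codes is pvBest of the events.
theorem pv_maxD_eq (l : List String) :
    PySem.List.maxD (l.map pvSev) (fun x => x) 0 = pvBest l := by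
  cases l with
  | nil => simp [PySem.List.maxD, PySem.List.max?, pvBest]
  | cons e t =>
    simp only [PySem.List.maxD, List.map_cons, PySem.List.max?_id_cons, Option.getD_some]
    rw [pv_foldmax _ _ (pvSev_nonneg e), pvBest_cons]

theorem pv_filter_len_eq_any (l : List String) :
    ((l.filter (fun e => !(e == ""))).length == 0) = !(l.any (fun e => !(e == ""))) := by
  induction l with
  | nil => simp
  | cons x xs ih =>
    by_cases h : x == "" <;> simp [List.any_cons, h, ih]

-- ===== VERDICT (by name: the statement is the Claim_ definition above) =====
theorem infer_label_from_markers_py_spec : Claim_equal_infer_label_from_markers_py := by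
  intro markers _
  unfold Spec_infer_label_from_markers_py infer_label_from_markers_py infer_label_from_markers_py_alt
  have hm : markers.map pvSeverity = (markers.map pvEvent).map pvSev := by
    rw [List.map_map]; rfl
  rw [hm, pv_maxD_eq]
  simp only [pv_filter_len_eq_any]
  unfold pvBest
  rcases hc : ((markers.map pvEvent).contains "human_start") with _ | _ <;>
    rcases ha : ((markers.map pvEvent).any (fun e => !(e == ""))) with _ | _ <;>
    decide
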